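-- pv_equiv track=rewrite | github.com/JimHeukels/OP2_2019-2020 | CH5/BA7.py | rectangle2
-- ===== SOURCE A (Python) =====
-- def line(n):
--   if n == 0:
--     return ''
--   else:
--     s = '*'
--     res = s + line(n-1)
--     return res
--
-- def rectangle2(rows, cols):
--   if rows == 0:
--     return ''
--   else:
--     half = rows // 2
--     halfRectangle = rectangle2(half, cols)
--     if rows % 2 != 0:
--       add = line(cols) + '\n'
--     else:
--       add = ''
--
--     return halfRectangle + add + halfRectangle
-- ===== SOURCE B (Python) =====
-- def rectangle2(rows, cols):
--     result = ''
--     for _ in range(rows):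
--         result += cols * '*' + '\n'
--     return result
-- ===== Notes on version B (the rewrite author's own statement) =====
-- stated objective: idiomatic
-- what changed: Replaced the halving divide-and-conquer recursion (and the recursive character-by-character line helper) by a single iterative loop that appends one row (cols*'*' plus newline) per pass.
import Mathlib
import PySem

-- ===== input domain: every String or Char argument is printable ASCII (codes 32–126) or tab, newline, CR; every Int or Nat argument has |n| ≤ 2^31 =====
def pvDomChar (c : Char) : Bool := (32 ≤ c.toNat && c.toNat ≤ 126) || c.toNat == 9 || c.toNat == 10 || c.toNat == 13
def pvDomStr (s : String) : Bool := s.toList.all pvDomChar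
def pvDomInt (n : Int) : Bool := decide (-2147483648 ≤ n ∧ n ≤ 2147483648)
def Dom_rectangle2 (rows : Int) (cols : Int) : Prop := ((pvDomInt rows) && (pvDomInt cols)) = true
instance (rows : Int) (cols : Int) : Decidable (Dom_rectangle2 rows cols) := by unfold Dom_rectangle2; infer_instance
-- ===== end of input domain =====

-- B replaces A's halving recursion (plus recursive line helper) by one iterative
-- row-appending loop; equivalence is proved on the inputs where A terminates.

-- ===== PORT A =====
-- line(n): builds '*'*n one character at a time by recursion.  For n < 0 the
-- Python recursion never reaches 0 (RecursionError); the `n ≤ 0` guard only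
-- totalizes the Lean function there — such inputs are outside Pre_rectangle2.
def lineA (n : Int) : String :=
  if n = 0 then ""
  else if n ≤ 0 then ""           -- totalization guard: Python raises RecursionError here
  else "*" ++ lineA (n - 1)
termination_by n.toNat
decreasing_by omega

-- rectangle2: divide and conquer on rows // 2.  For rows < 0 the Python
-- recursion never terminates (RecursionError); the guard only totalizes.
def rectangle2 (rows : Int) (cols : Int) : String :=
  if rows = 0 then ""
  else if rows < 0 then ""        -- totalization guard: Python raises RecursionError here
  else
    let half := PySem.Int.floordiv rows 2
    let halfRectangle := rectangle2 half cols
    let add := if PySem.Int.mod rows 2 ≠ 0 then lineA cols ++ "\n" else ""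
    halfRectangle ++ add ++ halfRectangle
termination_by rows.toNat
decreasing_by
  rw [PySem.Int.floordiv_eq_ediv_of_pos (by omega)]
  omega

-- ===== PORT B =====
-- result = ''; for _ in range(rows): result += cols*'*' + '\n'; return result
-- (Python's cols*'*' is empty for cols ≤ 0, i.e. replicate cols.toNat — exact.)
def rectangle2_alt (rows : Int) (cols : Int) : String :=
  (PySem.List.pyRange 0 rows 1).foldl
    (fun result _ => result ++ (String.ofList (List.replicate cols.toNat '*') ++ "\n")) ""

-- ===== PRECONDITION & SPEC =====
-- Pre_ excludes exactly the inputs where Python's A raises RecursionError: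
-- rows < 0, and rows > 0 with cols < 0 (line() recurses forever).
def Pre_rectangle2 (rows : Int) (cols : Int) : Prop := 0 ≤ rows ∧ (rows = 0 ∨ 0 ≤ cols)
instance (rows : Int) (cols : Int) : Decidable (Pre_rectangle2 rows cols) := by unfold Pre_rectangle2; infer_instance
def pvWitness_rectangle2 : Int × Int := (3, 4)

def Spec_rectangle2 (rows : Int) (cols : Int) (out : String) : Prop := out = rectangle2_alt rows cols
instance (rows : Int) (cols : Int) (out : String) : Decidable (Spec_rectangle2 rows cols out) := by unfold Spec_rectangle2; infer_instance

-- ===== CLAIM (what is proved, stated in full; the proofs are below) =====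
def Claim_equal_rectangle2 : Prop := ∀ (rows : Int) (cols : Int), Dom_rectangle2 rows cols → Pre_rectangle2 rows cols → Spec_rectangle2 rows cols (rectangle2 rows cols)

-- ===== LEMMAS AND PROOFS =====

-- one row of the rectangle, as a character list
def rowL (c : Nat) : List Char := List.replicate c '*' ++ ['\n']

-- the canonical result: r copies of a row of c stars
def canon (r : Nat) (c : Nat) : List Char := (List.replicate r (rowL c)).flatten

theorem canon_add (a b c : Nat) : canon (a + b) c = canon a c ++ canon b c := by
  simp only [canon, List.replicate_add, List.flatten_append]

theorem lineA_toList (m : Nat) : (lineA (m : Int)).toList = List.replicate m '*' := by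
  induction m with
  | zero => rw [lineA]; simp
  | succ k ih =>
      rw [lineA]
      have h1 : ¬ ((k + 1 : Nat) : Int) = 0 := by omega
      have h2 : ¬ ((k + 1 : Nat) : Int) ≤ 0 := by omega
      rw [if_neg h1, if_neg h2]
      have h3 : ((k + 1 : Nat) : Int) - 1 = ((k : Nat) : Int) := by omega
      rw [h3, List.replicate_succ]
      simp [ih]

theorem rectangle2_toList : ∀ (k : Nat) (rows cols : Int), rows.toNat = k → 0 ≤ rows → 0 ≤ cols →
    (rectangle2 rows cols).toList = canon k cols.toNat := by
  intro k
  induction k using Nat.strong_induction_on with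
  | _ k ih =>
    intro rows cols hk hr hc
    rw [rectangle2]
    by_cases h0 : rows = 0
    · subst h0; simp at hk; subst hk; simp [canon]
    · have hpos : 0 < rows := by omega
      have hneg : ¬ rows < 0 := by omega
      simp only [h0, if_false, hneg]
      have hfd : PySem.Int.floordiv rows 2 = rows / 2 :=
        PySem.Int.floordiv_eq_ediv_of_pos (by omega)
      have hmd : PySem.Int.mod rows 2 = rows % 2 :=
        PySem.Int.mod_eq_emod_of_pos (by omega)
      have hhalf : (rows / 2).toNat < k := by omega
      have hrec := ih _ hhalf (rows / 2) cols rfl (by omega) hc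
      rw [hfd, hmd]
      simp only [String.toList_append, hrec]
      by_cases hodd : rows % 2 ≠ 0
      · have hsplit : k = (rows / 2).toNat + 1 + (rows / 2).toNat := by omega
        have hl : (lineA cols).toList = List.replicate cols.toNat '*' := by
          have h := lineA_toList cols.toNat
          rwa [(by omega : ((cols.toNat : Nat) : Int) = cols)] at h
        rw [hsplit, canon_add, canon_add]
        simp [hodd, canon, rowL, hl]
      · have hsplit : k = (rows / 2).toNat + (rows / 2).toNat := by omega
        rw [hsplit, canon_add]
        simp [hodd]

theorem foldl_row_toList (s : String) : ∀ (l : List Int) (init : String),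
    (l.foldl (fun acc _ => acc ++ s) init).toList
      = init.toList ++ (List.replicate l.length s.toList).flatten := by
  intro l
  induction l with
  | nil => intro init; simp
  | cons x t ih =>
      intro init
      simp [List.foldl_cons, ih, List.replicate_succ]

theorem rectangle2_alt_toList (rows cols : Int) :
    (rectangle2_alt rows cols).toList = canon rows.toNat cols.toNat := by
  unfold rectangle2_alt
  rw [foldl_row_toList]
  simp [canon, rowL, PySem.List.length_pyRange_one]

-- ===== VERDICT (by name: the statement is the Claim_ definition above) =====
theorem rectangle2_spec : Claim_equal_rectangle2 := by
  intro rows cols _ hpre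
  unfold Spec_rectangle2
  rcases hpre with ⟨hr, hc⟩
  apply String.toList_inj.mp
  rcases hc with h0 | hc
  · subst h0
    rw [rectangle2]
    simp [rectangle2_alt_toList, canon]
  · rw [rectangle2_toList rows.toNat rows cols rfl hr hc, rectangle2_alt_toList]
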